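-- pv_equiv track=rewrite | github.com/zrshishir/python | ProgrammingBook/2CharacterString/22T9text/t9Text.py | PredictiveWord
-- ===== SOURCE A (Python) =====
-- t9 = "22233344455566677778889999"
--
-- def LetterToDigit(l):
--     assert 'a' <= l <= 'z'
--     return t9[ord(l) - ord('a')]
--
-- def CodeWord(word):
--     return ''.join(map(LetterToDigit, word))
--
-- def PredictiveWord(dict):
--     totalWeight = {}
--     for word, weight in dict:
--
--         prefix = ''
--         for x in word:
--             prefix += x
--             if prefix in totalWeight:
--                 totalWeight[prefix] += weight
--             else:
--                 totalWeight[prefix] = weight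
--     prop = {}
--     for prefix in totalWeight:
--         code = CodeWord(prefix)
--         if code not in prop or totalWeight[prop[code]] < totalWeight[prefix]:
--             prop[code] = prefix
--     return prop
-- ===== SOURCE B (Python) =====
-- t9 = "22233344455566677778889999"
--
-- def LetterToDigit(l):
--     assert 'a' <= l <= 'z'
--     return t9[ord(l) - ord('a')]
--
-- def CodeWord(word):
--     return ''.join(map(LetterToDigit, word))
--
-- def PredictiveWord(dict):
--     # Distinct prefixes of all words, in first-occurrence order (no aggregation here).
--     order = []
--     seen = set()
--     for word, _ in dict:
--         for i in range(1, len(word) + 1):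
--             p = word[:i]
--             if p not in seen:
--                 seen.add(p)
--                 order.append(p)
--     # Weight of each prefix computed independently as a startswith-sum over the whole input.
--     wt = {p: sum(w for s, w in dict if s.startswith(p)) for p in order}
--     # Group prefixes by T9 code, then pick the first maximal-weight prefix of each group.
--     groups = {}
--     for p in order:
--         groups.setdefault(CodeWord(p), []).append(p)
--     return {c: max(g, key=lambda q: wt[q]) for c, g in groups.items()}
-- ===== Notes on version B (the rewrite author's own statement) =====
-- stated objective: alternative
-- what changed: B drops A's mutating weight-aggregation dict entirely: it first collects the distinct prefixes in first-occurrence order with a seen-set, computes each prefix's weight independently as a startswith-sum over the whole input, and replaces A's running-max pass by grouping prefixes per T9 code and taking the first max of each group.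
import Mathlib
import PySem

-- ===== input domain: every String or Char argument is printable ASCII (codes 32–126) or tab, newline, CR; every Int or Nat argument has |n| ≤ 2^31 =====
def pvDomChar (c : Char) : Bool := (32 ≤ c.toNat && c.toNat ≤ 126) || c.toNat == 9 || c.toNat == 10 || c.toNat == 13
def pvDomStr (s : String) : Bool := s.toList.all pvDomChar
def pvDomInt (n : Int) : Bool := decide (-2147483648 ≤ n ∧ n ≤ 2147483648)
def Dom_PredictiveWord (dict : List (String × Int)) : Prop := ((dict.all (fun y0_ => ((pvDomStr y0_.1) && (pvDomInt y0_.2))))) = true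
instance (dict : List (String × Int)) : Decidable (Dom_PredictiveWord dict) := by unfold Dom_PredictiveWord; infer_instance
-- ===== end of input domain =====

-- B avoids A's mutating weight-aggregation dict: it collects the distinct prefixes with a seen-set,
-- computes each prefix's weight independently as a startswith-sum, and replaces A's running-max
-- pass by a group-by-code pass with a per-group first-max reduction (objective: alternative).

-- ===== PORT A =====
-- t9 = "22233344455566677778889999"
def pvT9 : List Char := "22233344455566677778889999".toList

-- LetterToDigit: t9[ord(l) - ord('a')]; the assert 'a' <= l <= 'z' (which also keeps the index
-- in range) raises outside Pre_, so the default ' ' is unreachable on Pre_.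
def pvLetterToDigit (l : Char) : Char := PySem.List.pyGetD pvT9 ((l.toNat : Int) - 97) ' '

-- CodeWord: ''.join(map(LetterToDigit, word))  (strings handled as List Char)
def pvCodeWord (word : List Char) : List Char := word.map pvLetterToDigit

-- first loop of A: aggregate prefix weights with the if/else update
def pvTotalWeightA (dict : List (String × Int)) : PySem.Dict (List Char) Int :=
  dict.foldl
    (fun tw wp =>
      ((wp.1.toList).foldl
        (fun (st : List Char × PySem.Dict (List Char) Int) x =>
          let pref := st.1 ++ [x]
          (pref,
            if st.2.contains pref then st.2.insert pref (st.2.getD pref 0 + wp.2)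
            else st.2.insert pref wp.2))
        (([] : List Char), tw)).2)
    PySem.Dict.empty

-- second loop of A: keep the strictly heavier prefix per code
def pvStep2A (tw : PySem.Dict (List Char) Int)
    (prop : PySem.Dict (List Char) (List Char)) (pref : List Char) :
    PySem.Dict (List Char) (List Char) :=
  -- code = CodeWord(prefix), inlined
  match prop.get? (pvCodeWord pref) with
  | none => prop.insert (pvCodeWord pref) pref
  | some q =>
    if tw.getD q 0 < tw.getD pref 0 then prop.insert (pvCodeWord pref) pref else prop

def PredictiveWord (dict : List (String × Int)) : List (String × String) :=
  let totalWeight := pvTotalWeightA dict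
  let prop := totalWeight.keys.foldl (pvStep2A totalWeight) PySem.Dict.empty
  prop.items.map (fun p => (String.ofList p.1, String.ofList p.2))

-- ===== PORT B =====
-- order/seen loop of B: if p not in seen: seen.add(p); order.append(p)
def pvStepOrder (st : List (List Char) × PySem.Set (List Char)) (p : List Char) :
    List (List Char) × PySem.Set (List Char) :=
  if st.2.contains p then st else (st.1 ++ [p], PySem.Set.add st.2 p)

-- for word, _ in dict: for i in range(1, len(word)+1): p = word[:i]; …
def pvOrderB (dict : List (String × Int)) : List (List Char) :=
  (dict.foldl
    (fun st wp =>
      (PySem.List.pyRange 1 ((wp.1.toList.length : Int) + 1) 1).foldl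
        (fun st i => pvStepOrder st (PySem.List.slice wp.1.toList none (some i)))
        st)
    (([] : List (List Char)), PySem.Set.empty)).1

-- sum(w for s, w in dict if s.startswith(p))
def pvWeightB (dict : List (String × Int)) (p : List Char) : Int :=
  dict.foldl (fun acc sw => if PySem.Chars.startswith sw.1.toList p then acc + sw.2 else acc) 0

-- wt = {p: sum(…) for p in order}
def pvWtB (dict : List (String × Int)) : PySem.Dict (List Char) Int :=
  (pvOrderB dict).foldl (fun d p => d.insert p (pvWeightB dict p)) PySem.Dict.empty

-- grouping loop of B: groups.setdefault(CodeWord(p), []).append(p)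
def pvStep2B (g : PySem.Dict (List Char) (List (List Char))) (pref : List Char) :
    PySem.Dict (List Char) (List (List Char)) :=
  -- code = CodeWord(prefix), inlined
  g.insert (pvCodeWord pref) (g.getD (pvCodeWord pref) [] ++ [pref])

-- final reduction: {c: max(g, key=lambda q: wt[q]) for c, g in groups.items()};
-- every group list is nonempty and its members are wt keys, so Python's max and wt[q] never
-- raise and the two .getD defaults are unreachable
def PredictiveWord_alt (dict : List (String × Int)) : List (String × String) :=
  let order := pvOrderB dict
  let wt := pvWtB dict
  let groups := order.foldl pvStep2B PySem.Dict.empty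
  groups.items.map (fun p =>
    (String.ofList p.1,
     String.ofList ((PySem.List.max? p.2 (fun q => wt.getD q 0)).getD [])))

-- ===== PRECONDITION & SPEC =====
-- Pre_ excludes exactly the inputs on which A raises: any word character outside 'a'..'z'
-- makes LetterToDigit's assert fail (AssertionError).
def Pre_PredictiveWord (dict : List (String × Int)) : Prop :=
  (dict.all (fun p => p.1.toList.all (fun c => 'a' ≤ c && c ≤ 'z'))) = true
instance (dict : List (String × Int)) : Decidable (Pre_PredictiveWord dict) := by
  unfold Pre_PredictiveWord; infer_instance

def pvWitness_PredictiveWord : (List (String × Int)) := [("hello", 3), ("he", 2), ("hi", -1)]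

def Spec_PredictiveWord (dict : List (String × Int)) (out : List (String × String)) : Prop := out = PredictiveWord_alt dict
instance (dict : List (String × Int)) (out : List (String × String)) : Decidable (Spec_PredictiveWord dict out) := by unfold Spec_PredictiveWord; infer_instance

-- ===== CLAIM (what is proved, stated in full; the proofs are below) =====
def Claim_equal_PredictiveWord : Prop := ∀ (dict : List (String × Int)), Dom_PredictiveWord dict → Pre_PredictiveWord dict → Spec_PredictiveWord dict (PredictiveWord dict)

-- ===== LEMMAS AND PROOFS =====

-- A's single-prefix update, abstracted
def pvUpd (d : PySem.Dict (List Char) Int) (p : List Char) (w : Int) :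
    PySem.Dict (List Char) Int :=
  if d.contains p then d.insert p (d.getD p 0 + w) else d.insert p w

-- the nonempty prefixes of a word, in order
def pvPrefixes (w : List Char) : List (List Char) :=
  (List.range w.length).map (fun j => w.take (j+1))

-- the reduction applied entrywise to a group entry
def pvF (tw : PySem.Dict (List Char) Int) (p : List Char × List (List Char)) :
    List Char × List Char :=
  (p.1, (PySem.List.max? p.2 (fun q => tw.getD q 0)).getD [])

theorem pv_innerA_eq (w : Int) (cs : List Char) : ∀ (pre : List Char) (d : PySem.Dict (List Char) Int),
    (cs.foldl
      (fun (st : List Char × PySem.Dict (List Char) Int) x =>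
        let pref := st.1 ++ [x]
        (pref,
          if st.2.contains pref then st.2.insert pref (st.2.getD pref 0 + w)
          else st.2.insert pref w))
      (pre, d)).2
    = ((List.range cs.length).map (fun j => pre ++ cs.take (j+1))).foldl
        (fun d p => pvUpd d p w) d := by
  induction cs with
  | nil => intro pre d; simp
  | cons c cs ih =>
      intro pre d
      simp only [List.foldl_cons, List.length_cons, List.range_succ_eq_map, List.map_cons,
        List.map_map]
      rw [ih (pre ++ [c]) _]
      simp [Function.comp_def, List.take_succ_cons]
      rfl

theorem pv_totalA_eq (dict : List (String × Int)) :
    pvTotalWeightA dict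
      = dict.foldl (fun d wp => (pvPrefixes wp.1.toList).foldl (fun d p => pvUpd d p wp.2) d)
          PySem.Dict.empty := by
  unfold pvTotalWeightA
  apply PySem.List.foldl_congr_mem
  intro d wp _
  rw [pv_innerA_eq wp.2 wp.1.toList [] d]
  simp [pvPrefixes]

theorem pv_rangePrefixes (w : List Char) (n : Nat) :
    (PySem.List.pyRange 1 ((n:Int)+1) 1).map (fun i => PySem.List.slice w none (some i))
      = (List.range n).map (fun j => w.take (j+1)) := by
  induction n with
  | zero => simp [PySem.List.pyRange]
  | succ m ih =>
      have h : ((m+1 : Nat) : Int) + 1 = ((m:Int)+1) + 1 := by push_cast; ring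
      rw [h, PySem.List.pyRange_one_succ_right (by omega), List.range_succ,
        List.map_append, List.map_append, ih]
      have h2 : PySem.List.slice w none (some ((m:Int)+1)) = w.take (m+1) := by
        have h3 : ((m:Int)+1) = ((m+1 : Nat) : Int) := by push_cast; ring
        rw [h3, PySem.List.slice_to_natCast]
      simp [h2]

theorem pv_stepOrder_pair (s : PySem.Set (List Char)) (p : List Char) :
    pvStepOrder (s, s) p = (PySem.Set.add s p, PySem.Set.add s p) := by
  by_cases h : p ∈ s <;> simp [pvStepOrder, PySem.Set.add, PySem.Set.contains, h]

theorem pv_order_pair (ps : List (List Char)) : ∀ s : PySem.Set (List Char),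
    ps.foldl pvStepOrder (s, s) = (PySem.Set.update s ps, PySem.Set.update s ps) := by
  induction ps with
  | nil => intro s; simp [PySem.Set.update]
  | cons p ps ih =>
      intro s
      rw [List.foldl_cons, pv_stepOrder_pair, ih]
      rfl

theorem pv_orderB_eq (dict : List (String × Int)) :
    pvOrderB dict
      = dict.foldl (fun s wp => PySem.Set.update s (pvPrefixes wp.1.toList)) [] := by
  unfold pvOrderB
  have main : ∀ (E : List (String × Int)) (s : PySem.Set (List Char)),
      E.foldl
        (fun st wp =>
          (PySem.List.pyRange 1 ((wp.1.toList.length : Int) + 1) 1).foldl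
            (fun st i => pvStepOrder st (PySem.List.slice wp.1.toList none (some i)))
            st)
        (s, s)
      = (E.foldl (fun s wp => PySem.Set.update s (pvPrefixes wp.1.toList)) s,
         E.foldl (fun s wp => PySem.Set.update s (pvPrefixes wp.1.toList)) s) := by
    intro E
    induction E with
    | nil => intro s; rfl
    | cons e E ih =>
        intro s
        rw [List.foldl_cons, List.foldl_cons]
        have hin : (PySem.List.pyRange 1 ((e.1.toList.length : Int) + 1) 1).foldl
            (fun st i => pvStepOrder st (PySem.List.slice e.1.toList none (some i))) (s, s)
            = (PySem.Set.update s (pvPrefixes e.1.toList),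
               PySem.Set.update s (pvPrefixes e.1.toList)) := by
          rw [← List.foldl_map (f := fun i => PySem.List.slice e.1.toList none (some i))
            (g := pvStepOrder), pv_rangePrefixes e.1.toList e.1.toList.length, ← pvPrefixes,
            pv_order_pair]
        rw [hin, ih]
  exact congrArg Prod.fst (main dict PySem.Set.empty)

theorem pv_mem_prefixes (w : List Char) (p : List Char) :
    p ∈ pvPrefixes w ↔ p ≠ [] ∧ p <+: w := by
  unfold pvPrefixes
  constructor
  · intro h
    obtain ⟨j, hj, rfl⟩ := List.mem_map.mp h
    rw [List.mem_range] at hj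
    constructor
    · intro hnil
      have hlen := congrArg List.length hnil
      simp only [List.length_take, List.length_nil] at hlen
      omega
    · exact List.take_prefix _ _
  · rintro ⟨hne, hpre⟩
    have hlen : p.length ≤ w.length := hpre.length_le
    have hpos : 0 < p.length := List.length_pos_iff.mpr hne
    refine List.mem_map.mpr ⟨p.length - 1, List.mem_range.mpr (by omega), ?_⟩
    have h1 : p.length - 1 + 1 = p.length := by omega
    rw [h1, ← List.prefix_iff_eq_take.mp hpre]

theorem pv_prefixes_nodup (w : List Char) : (pvPrefixes w).Nodup := by
  unfold pvPrefixes
  refine List.Nodup.map_on ?_ (List.nodup_range)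
  intro x hx y hy hxy
  rw [List.mem_range] at hx hy
  have := congrArg List.length hxy
  rw [List.length_take, List.length_take] at this
  omega

theorem pv_update_char (ps : List (List Char)) : ∀ (s : List (List Char)), ps.Nodup →
    PySem.Set.update s ps = s ++ ps.filter (fun p => !List.contains s p) := by
  induction ps with
  | nil => intro s _; simp [PySem.Set.update]
  | cons p ps ih =>
      intro s hnd
      have hpnotin : p ∉ ps := (List.nodup_cons.mp hnd).1
      have hupd : PySem.Set.update s (p :: ps) = PySem.Set.update (PySem.Set.add s p) ps := rfl
      by_cases h : p ∈ s
      · have hadd : PySem.Set.add s p = s := by simp [PySem.Set.add, PySem.Set.contains, h]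
        rw [hupd, hadd, ih s (List.nodup_cons.mp hnd).2]
        have : (p :: ps).filter (fun q => !List.contains s q) = ps.filter (fun q => !List.contains s q) := by
          simp [h]
        rw [this]
      · have hadd : PySem.Set.add s p = s ++ [p] := by
          simp [PySem.Set.add, PySem.Set.contains, h]
        rw [hupd, hadd, ih (s ++ [p]) (List.nodup_cons.mp hnd).2]
        have hfil : ps.filter (fun q => !List.contains (s ++ [p]) q)
            = ps.filter (fun q => !List.contains s q) := by
          apply List.filter_congr
          intro q hq
          have hqp : q ≠ p := by intro hEq; exact hpnotin (hEq ▸ hq)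
          simp [hqp]
        rw [hfil]
        have : (p :: ps).filter (fun q => !List.contains s q)
            = p :: ps.filter (fun q => !List.contains s q) := by
          simp [h]
        rw [this]
        simp

theorem pv_updAll_items (w : Int) (ps : List (List Char)) :
    ∀ (ord : List (List Char)) (d : PySem.Dict (List Char) Int) (wf : List Char → Int),
    ps.Nodup → ord.Nodup → d.items = ord.map (fun p => (p, wf p)) →
    (∀ p ∈ ps, p ∉ ord → wf p = 0) →
    (ps.foldl (fun d p => pvUpd d p w) d).items
      = (PySem.Set.update ord ps).map (fun p => (p, wf p + if p ∈ ps then w else 0)) := by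
  induction ps with
  | nil =>
      intro ord d wf _ _ hitems _
      simp only [List.foldl_nil, PySem.Set.update, List.foldl_nil]
      rw [hitems]
      apply List.map_congr_left
      intro p _
      simp
  | cons p0 tl ih =>
      intro ord d wf hnd hord hitems hzero
      have hkeys : d.keys = ord := by
        simp [PySem.Dict.keys, hitems, Function.comp_def]
      have hndk : d.keys.Nodup := hkeys ▸ hord
      have htl : tl.Nodup := (List.nodup_cons.mp hnd).2
      have hp0tl : p0 ∉ tl := (List.nodup_cons.mp hnd).1
      have hcont : d.contains p0 = decide (p0 ∈ ord) := by
        rw [PySem.Dict.contains_eq_decide_mem_keys, hkeys]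
      rw [List.foldl_cons]
      have hupdate : PySem.Set.update ord (p0 :: tl) = PySem.Set.update (PySem.Set.add ord p0) tl := rfl
      by_cases hmem : p0 ∈ ord
      · -- p0 already a key: insert in place
        have hc : d.contains p0 = true := by rw [hcont]; simpa
        have hitem0 : (p0, wf p0) ∈ d.items := by
          rw [hitems]; exact List.mem_map_of_mem hmem
        have hgetD : d.getD p0 0 = wf p0 := PySem.Dict.getD_of_mem_items d hitem0 hndk 0
        have hstep : pvUpd d p0 w = d.insert p0 (wf p0 + w) := by
          simp [pvUpd, hc, hgetD]
        have hitems' : (d.insert p0 (wf p0 + w)).items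
            = ord.map (fun p => (p, if p = p0 then wf p0 + w else wf p)) := by
          rw [PySem.Dict.items_insert_of_contains _ _ hc, hitems, List.map_map]
          apply List.map_congr_left
          intro q hq
          by_cases hqp : q = p0
          · subst hqp; simp
          · simp [Function.comp, hqp]
        rw [hstep, ih ord _ (fun p => if p = p0 then wf p0 + w else wf p) htl hord hitems'
          (by intro q hq hqo
              have hqp : q ≠ p0 := fun hEq => hqo (hEq ▸ hmem)
              simp only [hqp, if_false]
              exact hzero q (List.mem_cons_of_mem _ hq) hqo)]
        have hadd : PySem.Set.add ord p0 = ord := by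
          simp [PySem.Set.add, PySem.Set.contains, hmem]
        rw [hupdate, hadd]
        apply List.map_congr_left
        intro q hq
        by_cases hqp : q = p0
        · subst hqp; simp [hp0tl]
        · simp [hqp, List.mem_cons]
      · -- p0 a fresh key: appended with value w (wf p0 = 0)
        have hc : d.contains p0 = false := by rw [hcont]; simpa
        have hstep : pvUpd d p0 w = d.insert p0 w := by simp [pvUpd, hc]
        have hwf0 : wf p0 = 0 := hzero p0 List.mem_cons_self hmem
        have hitems' : (d.insert p0 w).items
            = (ord ++ [p0]).map (fun p => (p, if p = p0 then w else wf p)) := by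
          rw [PySem.Dict.items_insert_of_not_contains _ _ hc, hitems, List.map_append]
          congr 1
          · apply List.map_congr_left
            intro q hq
            have hqp : q ≠ p0 := fun hEq => hmem (hEq ▸ hq)
            simp [hqp]
          · simp
        have hordp : (ord ++ [p0]).Nodup := by
          rw [List.nodup_append]
          refine ⟨hord, List.nodup_singleton _, ?_⟩
          intro a ha b hb
          simp at hb
          subst hb
          exact fun hEq => hmem (hEq ▸ ha)
        rw [hstep, ih (ord ++ [p0]) _ (fun p => if p = p0 then w else wf p) htl hordp hitems'
          (by intro q hq hqo
              have hq1 : q ∉ ord := fun hin => hqo (List.mem_append_left _ hin)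
              have hqp : q ≠ p0 := fun hEq => hqo (hEq ▸ List.mem_append_right _ (List.mem_singleton.mpr rfl))
              simp only [hqp, if_false]
              exact hzero q (List.mem_cons_of_mem _ hq) hq1)]
        have hadd : PySem.Set.add ord p0 = ord ++ [p0] := by
          simp [PySem.Set.add, PySem.Set.contains, hmem]
        rw [hupdate, hadd]
        apply List.map_congr_left
        intro q hq
        by_cases hqp : q = p0
        · subst hqp; simp [hp0tl, hwf0]
        · simp [hqp, List.mem_cons]

theorem pv_mem_update (s : List (List Char)) (w : List Char) (p : List Char) :
    p ∈ PySem.Set.update s (pvPrefixes w) ↔ p ∈ s ∨ p ∈ pvPrefixes w := by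
  rw [pv_update_char _ s (pv_prefixes_nodup w), List.mem_append, List.mem_filter]
  constructor
  · rintro (h | ⟨h, _⟩)
    · exact Or.inl h
    · exact Or.inr h
  · rintro (h | h)
    · exact Or.inl h
    · by_cases hs : p ∈ s
      · exact Or.inl hs
      · exact Or.inr ⟨h, by simpa using hs⟩

theorem pv_foldl_update_mem (E : List (String × Int)) : ∀ (s : List (List Char)) (p : List Char),
    p ∈ E.foldl (fun s wp => PySem.Set.update s (pvPrefixes wp.1.toList)) s
      ↔ p ∈ s ∨ ∃ e ∈ E, p ∈ pvPrefixes e.1.toList := by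
  induction E with
  | nil => intro s p; simp
  | cons e E ih =>
      intro s p
      rw [List.foldl_cons, ih, pv_mem_update]
      simp [or_assoc]

theorem pv_orderB_mem (dict : List (String × Int)) (p : List Char) :
    p ∈ pvOrderB dict ↔ ∃ e ∈ dict, p ∈ pvPrefixes e.1.toList := by
  rw [pv_orderB_eq]
  simpa using pv_foldl_update_mem dict [] p

theorem pv_update_nodup (s : List (List Char)) (w : List Char) (hs : s.Nodup) :
    (PySem.Set.update s (pvPrefixes w)).Nodup := by
  rw [pv_update_char _ s (pv_prefixes_nodup w)]
  rw [List.nodup_append]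
  refine ⟨hs, (pv_prefixes_nodup w).filter _, ?_⟩
  intro a ha b hb
  have h2 := (List.mem_filter.mp hb).2
  simp at h2
  exact fun hEq => h2 (hEq ▸ ha)

theorem pv_orderB_nodup (dict : List (String × Int)) : (pvOrderB dict).Nodup := by
  rw [pv_orderB_eq]
  have main : ∀ (E : List (String × Int)) (s : List (List Char)), s.Nodup →
      (E.foldl (fun s wp => PySem.Set.update s (pvPrefixes wp.1.toList)) s).Nodup := by
    intro E
    induction E with
    | nil => intro s hs; exact hs
    | cons e E ih =>
        intro s hs
        exact ih _ (pv_update_nodup s e.1.toList hs)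
  exact main dict [] List.nodup_nil

theorem pv_orderB_ne (dict : List (String × Int)) : ∀ p ∈ pvOrderB dict, p ≠ [] := by
  intro p hp
  obtain ⟨e, _, hpe⟩ := (pv_orderB_mem dict p).mp hp
  exact ((pv_mem_prefixes _ _).mp hpe).1

theorem pv_A_items (dict : List (String × Int)) :
    (pvTotalWeightA dict).items = (pvOrderB dict).map (fun p => (p, pvWeightB dict p)) := by
  induction dict using List.reverseRecOn with
  | nil => rfl
  | append_singleton E e ih =>
      have h1 : pvTotalWeightA (E ++ [e])
          = (pvPrefixes e.1.toList).foldl (fun d p => pvUpd d p e.2) (pvTotalWeightA E) := by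
        rw [pv_totalA_eq, List.foldl_append, List.foldl_cons, List.foldl_nil, ← pv_totalA_eq]
      have hz : ∀ p ∈ pvPrefixes e.1.toList, p ∉ pvOrderB E → pvWeightB E p = 0 := by
        intro p hp hpo
        unfold pvWeightB
        rw [PySem.List.foldl_if_eq_foldl_filter]
        have hfil : E.filter (fun sw => PySem.Chars.startswith sw.1.toList p) = [] := by
          rw [List.filter_eq_nil_iff]
          intro sw hsw hstart
          have hpre : p <+: sw.1.toList := (PySem.Chars.startswith_iff _ _).mp hstart
          have hne : p ≠ [] := ((pv_mem_prefixes _ _).mp hp).1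
          exact hpo ((pv_orderB_mem E p).mpr
            ⟨sw, hsw, (pv_mem_prefixes _ _).mpr ⟨hne, hpre⟩⟩)
        rw [hfil]
        rfl
      have horder : pvOrderB (E ++ [e])
          = PySem.Set.update (pvOrderB E) (pvPrefixes e.1.toList) := by
        rw [pv_orderB_eq, List.foldl_append, List.foldl_cons, List.foldl_nil, ← pv_orderB_eq]
      rw [h1, pv_updAll_items e.2 _ (pvOrderB E) _ (pvWeightB E) (pv_prefixes_nodup _)
        (pv_orderB_nodup E) ih hz, horder]
      apply List.map_congr_left
      intro q hq
      have hqne : q ≠ [] := by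
        rcases (pv_mem_update (pvOrderB E) e.1.toList q).mp hq with h | h
        · exact pv_orderB_ne E q h
        · exact ((pv_mem_prefixes _ _).mp h).1
      have hiff : q ∈ pvPrefixes e.1.toList ↔ PySem.Chars.startswith e.1.toList q = true := by
        rw [pv_mem_prefixes, PySem.Chars.startswith_iff]
        exact ⟨fun h => h.2, fun h => ⟨hqne, h⟩⟩
      have hwB : pvWeightB (E ++ [e]) q
          = pvWeightB E q + (if q ∈ pvPrefixes e.1.toList then e.2 else 0) := by
        unfold pvWeightB
        rw [List.foldl_append, List.foldl_cons, List.foldl_nil]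
        by_cases hc : q ∈ pvPrefixes e.1.toList
        · rw [if_pos hc, if_pos (hiff.mp hc)]
        · rw [if_neg hc, if_neg (fun hb => hc (hiff.mpr hb)), add_zero]
      rw [hwB]

theorem pv_wtB_items (dict : List (String × Int)) :
    (pvWtB dict).items = (pvOrderB dict).map (fun p => (p, pvWeightB dict p)) := by
  unfold pvWtB
  rw [PySem.Dict.items_foldl_insert_fresh (pvOrderB dict) (fun p => p)
    (fun p => pvWeightB dict p) PySem.Dict.empty (by intro a _; simp)
    (by simpa using pv_orderB_nodup dict)]
  simp [PySem.Dict.empty]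

theorem pv_A_eq_wtB (dict : List (String × Int)) : pvTotalWeightA dict = pvWtB dict := by
  exact PySem.Dict.ext ((pv_A_items dict).trans (pv_wtB_items dict).symm)

theorem pv_wtB_keys (dict : List (String × Int)) :
    (pvWtB dict).keys = pvOrderB dict := by
  simp [PySem.Dict.keys, pv_wtB_items, Function.comp_def]

theorem pv_keys_of_items_map (tw : PySem.Dict (List Char) Int)
    (prop : PySem.Dict (List Char) (List Char)) (g : PySem.Dict (List Char) (List (List Char)))
    (h : prop.items = g.items.map (pvF tw)) : prop.keys = g.keys := by
  simp only [PySem.Dict.keys, h, List.map_map]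
  rfl

theorem pv_get?_of_items_map (tw : PySem.Dict (List Char) Int)
    (prop : PySem.Dict (List Char) (List Char)) (g : PySem.Dict (List Char) (List (List Char)))
    (h : prop.items = g.items.map (pvF tw)) (c : List Char) :
    prop.get? c = (g.get? c).map (fun l => (PySem.List.max? l (fun q => tw.getD q 0)).getD []) := by
  simp only [PySem.Dict.get?, h, List.find?_map, Option.map_map]
  rfl

theorem pv_max?_append_singleton {α : Type} (key : α → Int) (l : List α) (x : α) (m : α)
    (hm : PySem.List.max? l key = some m) :
    PySem.List.max? (l ++ [x]) key =
      some (if key m < key x then x else m) := by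
  simp only [PySem.List.max?] at *
  rw [List.foldl_append, hm]
  simp only [List.foldl]
  split_ifs <;> rfl

theorem pv_invariant (tw : PySem.Dict (List Char) Int) (L : List (List Char)) :
    ∀ (prop : PySem.Dict (List Char) (List Char)) (g : PySem.Dict (List Char) (List (List Char))),
      prop.items = g.items.map (pvF tw) →
      g.keys.Nodup →
      (∀ p ∈ g.items, p.2 ≠ []) →
      (L.foldl (pvStep2A tw) prop).items = (L.foldl pvStep2B g).items.map (pvF tw) := by
  induction L with
  | nil => intro prop g h _ _; simpa using h
  | cons pr L ih =>
    intro prop g h hnd hne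
    simp only [List.foldl]
    rcases hg : g.get? (pvCodeWord pr) with _ | lst
    · -- code not yet grouped: both sides append a fresh entry
      have hgc : g.contains (pvCodeWord pr) = false :=
        (PySem.Dict.get?_eq_none_iff_contains g _).mp hg
      have hpc : prop.contains (pvCodeWord pr) = false := by
        rw [PySem.Dict.contains_eq_decide_mem_keys, pv_keys_of_items_map tw prop g h,
          ← PySem.Dict.contains_eq_decide_mem_keys, hgc]
      have hp : prop.get? (pvCodeWord pr) = none := by
        rw [pv_get?_of_items_map tw prop g h, hg]; rfl
      have hstepA : pvStep2A tw prop pr = prop.insert (pvCodeWord pr) pr := by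
        unfold pvStep2A; rw [hp]
      have hstepB : pvStep2B g pr = g.insert (pvCodeWord pr) [pr] := by
        unfold pvStep2B
        rw [PySem.Dict.getD_of_not_contains _ _ hgc]
        rfl
      rw [hstepA, hstepB]
      apply ih
      · rw [PySem.Dict.items_insert_of_not_contains _ _ hpc,
          PySem.Dict.items_insert_of_not_contains _ _ hgc, List.map_append, h]
        rfl
      · exact PySem.Dict.nodup_keys_insert _ _ _ hnd
      · intro p hp
        rcases (PySem.Dict.mem_items_insert _ _ _ _).mp hp with rfl | ⟨hmem, _⟩
        · simp
        · exact hne p hmem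
    · -- code already grouped at the unique entry (code, lst)
      have hgc : g.contains (pvCodeWord pr) = true := by
        rw [PySem.Dict.contains_eq_isSome_get?, hg]; rfl
      have hlst : lst ≠ [] := hne _ (PySem.Dict.mem_items_of_get?_eq_some g hg)
      obtain ⟨m, hm⟩ : ∃ m, PySem.List.max? lst (fun q => tw.getD q 0) = some m := by
        rcases h' : PySem.List.max? lst (fun q => tw.getD q 0) with _ | m
        · exact absurd ((PySem.List.max?_eq_none_iff _ _).mp h') hlst
        · exact ⟨m, rfl⟩
      have hp : prop.get? (pvCodeWord pr) = some m := by
        rw [pv_get?_of_items_map tw prop g h, hg, Option.map_some, hm]; rfl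
      have hstepB : pvStep2B g pr = g.insert (pvCodeWord pr) (lst ++ [pr]) := by
        unfold pvStep2B
        rw [PySem.Dict.getD_eq_get?_getD, hg]
        rfl
      have huniq : ∀ p ∈ g.items, p.1 = pvCodeWord pr → p.2 = lst := by
        intro p hmem hfst
        have := PySem.Dict.get?_of_mem_items g (k := p.1) (v := p.2) (by simpa using hmem) hnd
        rw [hfst, hg] at this
        exact (Option.some_injective _ this.symm)
      have hitemsB : (pvStep2B g pr).items.map (pvF tw) =
          g.items.map (fun p =>
            if p.1 == pvCodeWord pr
            then (pvCodeWord pr, if tw.getD m 0 < tw.getD pr 0 then pr else m)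
            else pvF tw p) := by
        rw [hstepB, PySem.Dict.items_insert_of_contains _ _ hgc, List.map_map]
        apply List.map_congr_left
        intro p hmem
        by_cases hc : p.1 = pvCodeWord pr
        · have h2 : p.2 = lst := huniq p hmem hc
          simp only [Function.comp, hc, beq_self_eq_true, if_pos, pvF,
            pv_max?_append_singleton (fun q => tw.getD q 0) lst pr m hm]
          rfl
        · simp [Function.comp, hc, pvF]
      have hstepA : pvStep2A tw prop pr =
          if tw.getD m 0 < tw.getD pr 0 then prop.insert (pvCodeWord pr) pr else prop := by
        unfold pvStep2A; rw [hp]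
      rw [hstepA]
      have hinv2 : g.keys.Nodup ∧ ∀ p ∈ (pvStep2B g pr).items, p.2 ≠ [] := by
        refine ⟨hnd, ?_⟩
        intro p hp'
        rw [hstepB] at hp'
        rcases (PySem.Dict.mem_items_insert _ _ _ _).mp hp' with rfl | ⟨hmem, _⟩
        · simp [hlst]
        · exact hne p hmem
      by_cases hlt : tw.getD m 0 < tw.getD pr 0
      · rw [if_pos hlt]
        apply ih
        · have hpc : prop.contains (pvCodeWord pr) = true := by
            rw [PySem.Dict.contains_eq_isSome_get?, hp]; rfl
          rw [PySem.Dict.items_insert_of_contains _ _ hpc, hitemsB, h, List.map_map]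
          apply List.map_congr_left
          intro p hmem
          by_cases hc : p.1 = pvCodeWord pr
          · simp [Function.comp, pvF, hc, hlt]
          · simp [Function.comp, pvF, hc]
        · rw [hstepB]; exact PySem.Dict.nodup_keys_insert _ _ _ hinv2.1
        · exact hinv2.2
      · rw [if_neg hlt]
        apply ih
        · rw [hitemsB, h]
          apply List.map_congr_left
          intro p hmem
          by_cases hc : p.1 = pvCodeWord pr
          · have h2 : p.2 = lst := huniq p hmem hc
            have : pvF tw p = (pvCodeWord pr, m) := by
              simp [pvF, hc, h2, hm]
            simp [hc, hlt, this]
          · simp [hc]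
        · rw [hstepB]; exact PySem.Dict.nodup_keys_insert _ _ _ hinv2.1
        · exact hinv2.2

-- ===== VERDICT (by name: the statement is the Claim_ definition above) =====
theorem PredictiveWord_spec : Claim_equal_PredictiveWord := by
  intro dict _ _
  unfold Spec_PredictiveWord
  simp only [PredictiveWord, PredictiveWord_alt, pv_A_eq_wtB, pv_wtB_keys]
  rw [pv_invariant (pvWtB dict) (pvOrderB dict) PySem.Dict.empty PySem.Dict.empty rfl
    PySem.Dict.nodup_keys_empty (by intro p hp; simp [PySem.Dict.empty] at hp)]
  rw [List.map_map]
  rfl
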